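-- pv_equiv track=rewrite | github.com/Clawtrap23/local-business-scraper | src/enrich_data.py | choose_best_contact_url
-- ===== SOURCE A (Python) =====
-- from typing import Dict, List, Set, Tuple
--
-- def choose_best_contact_url(contact_links: List[str]) -> str:
--     if not contact_links:
--         return ""
--     ranked: List[Tuple[int, str]] = []
--     for link in contact_links:
--         score = 0
--         lowered = link.lower()
--         if 'contact' in lowered:
--             score += 3
--         if 'quote' in lowered or 'book' in lowered or 'enquiry' in lowered or 'inquiry' in lowered:
--             score += 2
--         ranked.append((score, link))
--     ranked.sort(reverse=True)
--     return ranked[0][1]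
-- ===== SOURCE B (Python) =====
-- def choose_best_contact_url(contact_links):
--     if not contact_links:
--         return ""
--     best = None
--     for link in contact_links:
--         lowered = link.lower()
--         score = (3 if 'contact' in lowered else 0) + (
--             2 if ('quote' in lowered or 'book' in lowered
--                   or 'enquiry' in lowered or 'inquiry' in lowered) else 0)
--         if best is None or (score, link) > best:
--             best = (score, link)
--     return best[1]
-- ===== Notes on version B (the rewrite author's own statement) =====
-- stated objective: simpler
-- what changed: Replaces build-list-then-reverse-sort-and-take-[0] with a single pass that keeps the running best (score, link) tuple; tuple comparison preserves the score-then-link tie-break of the reverse sort.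
import Mathlib
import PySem

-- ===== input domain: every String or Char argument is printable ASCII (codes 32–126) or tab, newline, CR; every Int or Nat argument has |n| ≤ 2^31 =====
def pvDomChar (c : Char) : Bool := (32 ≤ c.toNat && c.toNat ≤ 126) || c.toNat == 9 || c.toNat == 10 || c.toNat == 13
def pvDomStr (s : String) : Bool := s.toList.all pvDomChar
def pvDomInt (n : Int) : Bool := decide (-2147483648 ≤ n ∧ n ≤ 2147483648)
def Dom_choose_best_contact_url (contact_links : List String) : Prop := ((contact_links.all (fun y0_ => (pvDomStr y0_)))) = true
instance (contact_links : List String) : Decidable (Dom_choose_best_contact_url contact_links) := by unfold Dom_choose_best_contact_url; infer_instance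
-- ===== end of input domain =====

-- B replaces "build (score, link) list, reverse-sort it, take [0]" by a single pass
-- keeping the running best (score, link) tuple (same score-then-link tie-break); objective: simpler.

-- ===== PORT A =====
def choose_best_contact_url (contact_links : List String) : String :=
  if contact_links = [] then ""
  else
    let ranked : List (Int × String) := contact_links.foldl (fun acc link =>
      let score : Int := 0
      let lowered := PySem.Str.lower link
      let score := if PySem.Str.isIn "contact" lowered then score + 3 else score
      let score := if PySem.Str.isIn "quote" lowered || PySem.Str.isIn "book" lowered
                    || PySem.Str.isIn "enquiry" lowered || PySem.Str.isIn "inquiry" lowered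
                   then score + 2 else score
      acc ++ [(score, link)]) []
    match PySem.List.sorted2 ranked (fun p => p.1) (fun p => p.2) true with
    | [] => ""                      -- unreachable: ranked is nonempty here
    | p :: _ => p.2

-- ===== PORT B =====
def pvScore (link : String) : Int :=
  let lowered := PySem.Str.lower link
  (if PySem.Str.isIn "contact" lowered then (3 : Int) else 0) +
  (if PySem.Str.isIn "quote" lowered || PySem.Str.isIn "book" lowered
      || PySem.Str.isIn "enquiry" lowered || PySem.Str.isIn "inquiry" lowered then (2 : Int) else 0)

-- Python tuple comparison (score, link) > best, i.e. best < (score, link) lexicographically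
def pvBetter (b : Int × String) (score : Int) (link : String) : Bool :=
  decide (b.1 < score) || (decide (b.1 = score) && decide (b.2 < link))

def choose_best_contact_url_alt (contact_links : List String) : String :=
  if contact_links = [] then ""
  else
    match contact_links.foldl (fun best link =>
      let score := pvScore link
      match best with
      | none => some (score, link)
      | some b => if pvBetter b score link then some (score, link) else some b) none with
    | some b => b.2
    | none => ""                    -- unreachable: the list is nonempty here

-- ===== PRECONDITION & SPEC =====
def Spec_choose_best_contact_url (contact_links : List String) (out : String) : Prop := out = choose_best_contact_url_alt contact_links
instance (contact_links : List String) (out : String) : Decidable (Spec_choose_best_contact_url contact_links out) := by unfold Spec_choose_best_contact_url; infer_instance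

-- ===== CLAIM (what is proved, stated in full; the proofs are below) =====
def Claim_equal_choose_best_contact_url : Prop := ∀ (contact_links : List String), Dom_choose_best_contact_url contact_links → Spec_choose_best_contact_url contact_links (choose_best_contact_url contact_links)

-- ===== LEMMAS AND PROOFS =====

-- the pair A appends for each link, written with B's scorer
def pvRank (link : String) : Int × String := (pvScore link, link)

lemma pvRank_eq (link : String) :
    (let score : Int := 0
     let lowered := PySem.Str.lower link
     let score := if PySem.Str.isIn "contact" lowered then score + 3 else score
     let score := if PySem.Str.isIn "quote" lowered || PySem.Str.isIn "book" lowered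
                   || PySem.Str.isIn "enquiry" lowered || PySem.Str.isIn "inquiry" lowered
                  then score + 2 else score
     ((score, link) : Int × String)) = pvRank link := by
  simp only [pvRank, pvScore]
  split_ifs <;> simp

-- A's ranked list is the map of pvRank
lemma ranked_eq_map (links : List String) :
    links.foldl (fun acc link =>
      let score : Int := 0
      let lowered := PySem.Str.lower link
      let score := if PySem.Str.isIn "contact" lowered then score + 3 else score
      let score := if PySem.Str.isIn "quote" lowered || PySem.Str.isIn "book" lowered
                    || PySem.Str.isIn "enquiry" lowered || PySem.Str.isIn "inquiry" lowered
                   then score + 2 else score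
      acc ++ [(score, link)]) [] = links.map pvRank := by
  have h := PySem.List.foldl_append_singleton_eq_map (fun link =>
      (let score : Int := 0
       let lowered := PySem.Str.lower link
       let score := if PySem.Str.isIn "contact" lowered then score + 3 else score
       let score := if PySem.Str.isIn "quote" lowered || PySem.Str.isIn "book" lowered
                     || PySem.Str.isIn "enquiry" lowered || PySem.Str.isIn "inquiry" lowered
                    then score + 2 else score
       ((score, link) : Int × String))) links []
  rw [h, List.nil_append]
  exact List.map_congr_left (fun l _ => pvRank_eq l)

-- sorted2 on pairs is sorted by the lexicographic key
lemma sorted2_eq_sorted_lex (xs : List (Int × String)) :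
    PySem.List.sorted2 xs (fun p => p.1) (fun p => p.2) true
      = PySem.List.sorted xs (fun p => toLex p) true := by
  simp only [PySem.List.sorted2, PySem.List.sorted]
  congr 1
  funext acc x
  congr 1
  funext a b
  rcases lt_trichotomy a.1 b.1 with h | h | h
  · simp [not_lt_of_gt h, h, le_of_lt (Prod.Lex.toLex_lt_toLex.2 (Or.inl h))]
  · simp [h, Prod.Lex.toLex_lt_toLex, String.lt_iff_toList_lt]
  · simp [not_lt_of_gt h, h, Prod.Lex.toLex_lt_toLex.2 (Or.inl h)]

lemma pvBetter_iff (b : Int × String) (s : Int) (l : String) :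
    pvBetter b s l = true ↔ toLex b < toLex (s, l) := by
  simp [pvBetter, Prod.Lex.toLex_lt_toLex]

-- the running max of B's loop
def pvMaxLex (c y : Int × String) : Int × String :=
  if toLex c < toLex y then y else c

lemma b_fold_eq (links : List String) (b : Int × String) :
    links.foldl (fun best link =>
      let score := pvScore link
      match best with
      | none => some (score, link)
      | some b => if pvBetter b score link then some (score, link) else some b) (some b)
    = some ((links.map pvRank).foldl pvMaxLex b) := by
  induction links generalizing b with
  | nil => rfl
  | cons l ls ih =>
    simp only [List.foldl_cons, List.map_cons]
    have hstep : (if pvBetter b (pvScore l) l then some (pvScore l, l) else some b)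
        = some (pvMaxLex b (pvRank l)) := by
      simp only [pvMaxLex, pvRank]
      by_cases h : toLex b < toLex (pvScore l, l)
      · rw [if_pos ((pvBetter_iff _ _ _).2 h), if_pos h]
      · rw [if_neg (fun hc => h ((pvBetter_iff _ _ _).1 hc)), if_neg h]
    rw [hstep]
    exact ih (pvMaxLex b (pvRank l))

lemma foldl_pvMaxLex_spec (xs : List (Int × String)) (b : Int × String) :
    xs.foldl pvMaxLex b ∈ b :: xs ∧ ∀ y ∈ b :: xs, toLex y ≤ toLex (xs.foldl pvMaxLex b) := by
  induction xs generalizing b with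
  | nil => exact ⟨List.mem_singleton.2 rfl, by simp⟩
  | cons x t ih =>
    simp only [List.foldl_cons]
    obtain ⟨hmem, hmax⟩ := ih (pvMaxLex b x)
    constructor
    · rcases List.mem_cons.1 hmem with h | h
      · rw [h]
        simp only [pvMaxLex]
        split_ifs
        · exact List.mem_cons_of_mem _ (List.mem_cons_self)
        · exact List.mem_cons_self
      · exact List.mem_cons_of_mem _ (List.mem_cons_of_mem _ h)
    · intro y hy
      rcases List.mem_cons.1 hy with h | h
      · subst h
        refine le_trans ?_ (hmax _ List.mem_cons_self)
        simp only [pvMaxLex]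
        split_ifs with hlt
        · exact le_of_lt hlt
        · exact le_refl _
      · rcases List.mem_cons.1 h with h' | h'
        · subst h'
          refine le_trans ?_ (hmax _ List.mem_cons_self)
          simp only [pvMaxLex]
          split_ifs with hlt
          · exact le_refl _
          · exact le_of_not_gt hlt
        · exact hmax _ (List.mem_cons_of_mem _ h')

-- ===== VERDICT (by name: the statement is the Claim_ definition above) =====
theorem choose_best_contact_url_spec : Claim_equal_choose_best_contact_url := by
  intro links _
  unfold Spec_choose_best_contact_url choose_best_contact_url choose_best_contact_url_alt
  by_cases hnil : links = []
  · simp [hnil]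
  · simp only [if_neg hnil]
    obtain ⟨l, ls, rfl⟩ := List.exists_cons_of_ne_nil hnil
    rw [ranked_eq_map, sorted2_eq_sorted_lex]
    -- B side: fold computes the lex max of the mapped list
    have hstep : ((l :: ls).foldl (fun best link =>
        let score := pvScore link
        match best with
        | none => some (score, link)
        | some b => if pvBetter b score link then some (score, link) else some b) none)
        = some ((ls.map pvRank).foldl pvMaxLex (pvRank l)) := by
      simp only [List.foldl_cons]
      exact b_fold_eq ls (pvRank l)
    rw [hstep]
    set mB := (ls.map pvRank).foldl pvMaxLex (pvRank l) with hmB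
    obtain ⟨hBmem, hBmax⟩ := foldl_pvMaxLex_spec (ls.map pvRank) (pvRank l)
    have hBmem' : mB ∈ (l :: ls).map pvRank := by
      simpa using hBmem
    have hBmax' : ∀ y ∈ (l :: ls).map pvRank, toLex y ≤ toLex mB := by
      intro y hy
      apply hBmax
      simpa using hy
    -- A side: the sorted list is nonempty; its head has maximal key and is in ranked
    rcases hs : PySem.List.sorted ((l :: ls).map pvRank) (fun p => toLex p) true with _ | ⟨mA, t⟩
    · exfalso
      have := (PySem.List.sorted_eq_nil_iff ((l :: ls).map pvRank) (fun p => toLex p) true).1 hs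
      simp at this
    · have hAmem : mA ∈ (l :: ls).map pvRank := by
        have hperm := PySem.List.sorted_perm ((l :: ls).map pvRank) (fun p => toLex p) true
        rw [hs] at hperm
        exact hperm.mem_iff.1 List.mem_cons_self
      have hAmax : ∀ y ∈ (l :: ls).map pvRank, toLex y ≤ toLex mA :=
        PySem.List.key_head_sorted_rev_ge ((l :: ls).map pvRank) (fun p => toLex p) hs
      have hkey : toLex mA = toLex mB :=
        le_antisymm (hBmax' mA hAmem) (hAmax mB hBmem')
      have : mA = mB := toLex.injective hkey
      rw [this]
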